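-- pv_equiv track=rewrite | github.com/AlexDunnCS/acoustic_fence_algo | binary_fence_sim.py | find_first_fault_in
-- ===== SOURCE A (Python) =====
-- def find_first_fault_in(fence, start, end):
--     # If this is the faulty section
--     if True in fence[start:end] and start + 1 == end:
--         # Return the section id and increment the check counter
--         return {'fault_at': start, 'checks_performed': 1}
--
--     elif True in fence[start:end]:
--         middle = int((start + end) / 2)
--         first_check = find_first_fault_in(fence, start, middle)
--         if first_check['fault_at'] != -1:
--             return {'fault_at': first_check['fault_at'], 'checks_performed': 1 + first_check['checks_performed']}
--         else:
--             second_check = find_first_fault_in(fence, middle, end)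
--             return {'fault_at': second_check['fault_at'], 'checks_performed': (1
--                                                                                + first_check['checks_performed']
--                                                                                + second_check['checks_performed'])}
--     else:
--         return {'fault_at': -1, 'checks_performed': 1}
-- ===== SOURCE B (Python) =====
-- def find_first_fault_in(fence, start, end):
--     # Iterative binary descent with a running check counter instead of
--     # recursion that merges sub-results.
--     if not any(fence[start:end]):
--         return {'fault_at': -1, 'checks_performed': 1}
--     a, b = start, end
--     checks = 1
--     while a + 1 != b:
--         m = int((a + b) / 2)
--         if any(fence[a:m]):
--             b = m
--             checks += 1
--         else:
--             a = m
--             checks += 2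
--     return {'fault_at': a, 'checks_performed': checks}
-- ===== Notes on version B (the rewrite author's own statement) =====
-- stated objective: simpler
-- what changed: B replaces A's recursion (which merges fault/check counts from both sub-calls) with a plain iterative binary descent: one while loop narrowing [a,b) and a running check counter (+1 when descending left, +2 when the left-half check fails and it descends right); Pre_ excludes only the inputs where A raises RecursionError (start >= end while the slice still contains True).
import Mathlib
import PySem

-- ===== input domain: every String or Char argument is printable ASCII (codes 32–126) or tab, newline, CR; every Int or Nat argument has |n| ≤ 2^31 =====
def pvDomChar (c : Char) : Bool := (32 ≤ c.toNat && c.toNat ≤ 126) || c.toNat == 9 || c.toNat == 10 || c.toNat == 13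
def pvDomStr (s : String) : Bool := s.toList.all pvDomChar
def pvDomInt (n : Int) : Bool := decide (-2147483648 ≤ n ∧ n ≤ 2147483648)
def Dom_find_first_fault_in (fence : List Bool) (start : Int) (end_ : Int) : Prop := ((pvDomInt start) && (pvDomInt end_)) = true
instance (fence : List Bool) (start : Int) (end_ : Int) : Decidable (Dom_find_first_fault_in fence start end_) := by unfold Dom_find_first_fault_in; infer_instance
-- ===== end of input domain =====

-- B replaces A's recursive divide-and-merge with an iterative binary descent keeping a running check counter (objective: simpler).


-- ===== PORT A =====
-- A's recursion, with a fuel counter only to make it total in Lean: under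
-- Pre_ every recursive call strictly shrinks end_-start, so fuel
-- (end_-start).toNat+1 is never exhausted. int((start+end)/2) is truncating
-- division (exact for |start+end| ≤ 2^32, guaranteed by Dom), ported as Int.tdiv.
def ffA (fence : List Bool) : Nat → Int → Int → Int × Int
  | 0, _, _ => (-1, 0)  -- fuel exhausted: unreachable under Pre_
  | fuel+1, start, end_ =>
    if (PySem.List.slice fence (some start) (some end_)).contains true ∧ start + 1 = end_ then
      (start, 1)
    else if (PySem.List.slice fence (some start) (some end_)).contains true then
      let middle := (start + end_).tdiv 2
      let first_check := ffA fence fuel start middle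
      if first_check.1 ≠ -1 then
        (first_check.1, 1 + first_check.2)
      else
        let second_check := ffA fence fuel middle end_
        (second_check.1, 1 + first_check.2 + second_check.2)
    else (-1, 1)

def find_first_fault_in (fence : List Bool) (start : Int) (end_ : Int) : List (String × Int) :=
  let r := ffA fence ((end_ - start).toNat + 1) start end_
  [("fault_at", r.1), ("checks_performed", r.2)]

-- ===== PORT B =====
-- the while loop of Source B, with the same fuel device to make it total in Lean
def ffBloop (fence : List Bool) : Nat → Int → Int → Int → Int × Int
  | 0, a, _, checks => (a, checks)  -- fuel exhausted: unreachable under Pre_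
  | fuel+1, a, b, checks =>
    if a + 1 = b then (a, checks)
    else
      let m := (a + b).tdiv 2
      if (PySem.List.slice fence (some a) (some m)).contains true then
        ffBloop fence fuel a m (checks + 1)
      else
        ffBloop fence fuel m b (checks + 2)

def find_first_fault_in_alt (fence : List Bool) (start : Int) (end_ : Int) : List (String × Int) :=
  if ¬ (PySem.List.slice fence (some start) (some end_)).contains true then
    [("fault_at", -1), ("checks_performed", 1)]
  else
    let r := ffBloop fence ((end_ - start).toNat + 1) start end_ 1
    [("fault_at", r.1), ("checks_performed", r.2)]

-- ===== PRECONDITION & SPEC =====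
-- Pre_ excludes exactly the inputs where A raises (RecursionError): start ≥ end_
-- while fence[start:end_] still contains True (mixed-sign index wraparound);
-- there the recursion never shrinks the interval and A recurses forever.
def Pre_find_first_fault_in (fence : List Bool) (start : Int) (end_ : Int) : Prop :=
  start < end_ ∨ (PySem.List.slice fence (some start) (some end_)).contains true = false

instance (fence : List Bool) (start : Int) (end_ : Int) : Decidable (Pre_find_first_fault_in fence start end_) := by
  unfold Pre_find_first_fault_in; infer_instance

def pvWitness_find_first_fault_in : List Bool × Int × Int := ([false, true, false], 0, 3)

def Spec_find_first_fault_in (fence : List Bool) (start : Int) (end_ : Int) (out : List (String × Int)) : Prop := out = find_first_fault_in_alt fence start end_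
instance (fence : List Bool) (start : Int) (end_ : Int) (out : List (String × Int)) : Decidable (Spec_find_first_fault_in fence start end_ out) := by unfold Spec_find_first_fault_in; infer_instance

-- ===== CLAIM (what is proved, stated in full; the proofs are below) =====
def Claim_equal_find_first_fault_in : Prop := ∀ (fence : List Bool) (start : Int) (end_ : Int), Dom_find_first_fault_in fence start end_ → Pre_find_first_fault_in fence start end_ → Spec_find_first_fault_in fence start end_ (find_first_fault_in fence start end_)

-- ===== LEMMAS AND PROOFS =====

-- the truncating midpoint lies strictly inside an interval of length ≥ 2
theorem mid_bounds (a b : Int) (h : a + 2 ≤ b) : a < (a + b).tdiv 2 ∧ (a + b).tdiv 2 < b := by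
  have ht : (a + b).tdiv 2 = (a + b) / 2 + if 0 ≤ (a + b) ∨ (2:Int) ∣ (a + b) then 0 else (2:Int).sign :=
    Int.tdiv_eq_ediv
  by_cases hc : 0 ≤ (a + b) ∨ (2:Int) ∣ (a + b)
  · simp only [hc, if_true, add_zero] at ht
    rcases hc with hc | hc
    · omega
    · obtain ⟨c, hcc⟩ := hc; omega
  · simp only [hc, if_false, Int.sign_eq_one_iff_pos.mpr (by norm_num : (0:Int) < 2)] at ht
    push_neg at hc
    omega

-- counting true in a prefix is monotone
theorem count_take_le (fence : List Bool) (i j : Nat) (hij : i ≤ j) :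
    (fence.take i).count true ≤ (fence.take j).count true := by
  have : fence.take j = fence.take i ++ (fence.drop i).take (j - i) := by
    rw [← List.take_add]; congr 1; omega
  rw [this, List.count_append]; omega

-- the slice-membership test, characterised by prefix counts (valid for ANY bounds,
-- including negative / wrapped ones: an inverted clamped range gives an empty slice
-- and the two counts are then equal by monotonicity)
theorem contains_slice (l : List Bool) (x y : Int) :
    (PySem.List.slice l (some x) (some y)).contains true =
      decide ((l.take (PySem.List.clampIdx l.length x)).count true <
              (l.take (PySem.List.clampIdx l.length y)).count true) := by
  have hs : PySem.List.slice l (some x) (some y) =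
      (l.drop (PySem.List.clampIdx l.length x)).take
        (PySem.List.clampIdx l.length y - PySem.List.clampIdx l.length x) := rfl
  set cx := PySem.List.clampIdx l.length x
  set cy := PySem.List.clampIdx l.length y
  by_cases hord : cx ≤ cy
  · have hsplit : l.take cy = l.take cx ++ (l.drop cx).take (cy - cx) := by
      rw [← List.take_add]; congr 1; omega
    rw [hs]
    rcases Nat.eq_zero_or_pos (((l.drop cx).take (cy - cx)).count true) with h | h
    · have hmem : ¬ true ∈ (l.drop cx).take (cy - cx) := by
        intro hm; have := List.count_pos_iff.mpr hm; omega
      have heq : (l.take cy).count true = (l.take cx).count true := by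
        rw [hsplit, List.count_append]; omega
      simp [List.contains_eq_mem, hmem, heq]
    · have hmem : true ∈ (l.drop cx).take (cy - cx) := List.count_pos_iff.mp h
      have hlt : (l.take cx).count true < (l.take cy).count true := by
        rw [hsplit, List.count_append]; omega
      simp [List.contains_eq_mem, hmem, hlt]
  · have h0 : cy - cx = 0 := by omega
    have hmono := count_take_le l cy cx (by omega)
    rw [hs, h0]
    simp
    omega

-- one-step unfolding equations for port A
theorem ffA_leaf (fence : List Bool) (fuel : Nat) (a b : Int)
    (h1 : (PySem.List.slice fence (some a) (some b)).contains true = true) (h2 : a + 1 = b) :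
    ffA fence (fuel + 1) a b = (a, 1) := by
  simp only [ffA]; rw [if_pos ⟨h1, h2⟩]

theorem ffA_no_fault (fence : List Bool) (fuel : Nat) (a b : Int)
    (h : (PySem.List.slice fence (some a) (some b)).contains true = false) :
    ffA fence (fuel + 1) a b = (-1, 1) := by
  simp only [ffA]
  rw [if_neg (by rintro ⟨hc, _⟩; rw [h] at hc; cases hc),
      if_neg (by rw [h]; exact Bool.false_ne_true)]

theorem ffA_step (fence : List Bool) (fuel : Nat) (a b : Int)
    (h1 : (PySem.List.slice fence (some a) (some b)).contains true = true) (h2 : ¬ a + 1 = b) :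
    ffA fence (fuel + 1) a b =
      (if (ffA fence fuel a ((a + b).tdiv 2)).1 ≠ -1 then
        ((ffA fence fuel a ((a + b).tdiv 2)).1, 1 + (ffA fence fuel a ((a + b).tdiv 2)).2)
      else
        ((ffA fence fuel ((a + b).tdiv 2) b).1,
          1 + (ffA fence fuel a ((a + b).tdiv 2)).2 + (ffA fence fuel ((a + b).tdiv 2) b).2)) := by
  simp only [ffA]
  rw [if_neg (by rintro ⟨_, h⟩; exact h2 h), if_pos h1]

-- a faulty right half follows from a faulty whole range and a clean left half
theorem right_faulty (fence : List Bool) (a m b : Int)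
    (htrue : (PySem.List.slice fence (some a) (some b)).contains true = true)
    (hleft : (PySem.List.slice fence (some a) (some m)).contains true = false) :
    (PySem.List.slice fence (some m) (some b)).contains true = true := by
  rw [contains_slice] at htrue hleft ⊢
  simp only [decide_eq_true_eq] at htrue ⊢
  simp only [decide_eq_false_iff_not, not_lt] at hleft
  omega

-- under Pre_, A never returns fault_at = -1 on a faulty range
theorem ffA_ne_neg_one (fence : List Bool) (fuel : Nat) : ∀ (a b : Int),
    a < b → (PySem.List.slice fence (some a) (some b)).contains true = true →
    (b - a).toNat ≤ fuel → (ffA fence fuel a b).1 ≠ -1 := by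
  induction fuel with
  | zero => intro a b hab _ hf; omega
  | succ fuel ih =>
    intro a b hab htrue hf
    by_cases hleaf : a + 1 = b
    · rw [ffA_leaf fence fuel a b htrue hleaf]
      -- the leaf index cannot be -1: fence[-1:0] is always empty, contradicting the fault
      intro hEq
      have ha : a = -1 := hEq
      have hb : b = 0 := by omega
      rw [contains_slice] at htrue
      simp only [decide_eq_true_eq] at htrue
      have h0 : PySem.List.clampIdx fence.length (0:Int) = 0 := by
        norm_num [PySem.List.clampIdx]
      rw [ha, hb, h0] at htrue
      simp at htrue
    · rw [ffA_step fence fuel a b htrue hleaf]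
      have hb2 : a + 2 ≤ b := by omega
      obtain ⟨hm1, hm2⟩ := mid_bounds a b hb2
      set m := (a + b).tdiv 2 with hm
      by_cases hfc : (ffA fence fuel a m).1 = -1
      · rw [if_neg (by simpa using hfc)]
        have hleft : (PySem.List.slice fence (some a) (some m)).contains true = false := by
          cases hx : (PySem.List.slice fence (some a) (some m)).contains true
          · rfl
          · exact absurd hfc (ih a m hm1 hx (by omega))
        exact ih m b hm2 (right_faulty fence a m b htrue hleft) (by omega)
      · rw [if_pos (by simpa using hfc)]; exact hfc

-- main bridge: on a faulty range, B's loop reproduces A's recursion with an offset counter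
theorem loop_eq_ffA (fence : List Bool) (fuel : Nat) : ∀ (a b : Int) (k : Int),
    a < b → (PySem.List.slice fence (some a) (some b)).contains true = true →
    (b - a).toNat ≤ fuel →
    ffBloop fence fuel a b k = ((ffA fence fuel a b).1, k - 1 + (ffA fence fuel a b).2) := by
  induction fuel with
  | zero => intro a b k hab _ hf; omega
  | succ fuel ih =>
    intro a b k hab htrue hf
    by_cases hleaf : a + 1 = b
    · rw [ffA_leaf fence fuel a b htrue hleaf]
      simp only [ffBloop]
      rw [if_pos hleaf]
      simp only [Prod.mk.injEq]
      exact ⟨trivial, by omega⟩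
    · rw [ffA_step fence fuel a b htrue hleaf]
      have hb2 : a + 2 ≤ b := by omega
      obtain ⟨hm1, hm2⟩ := mid_bounds a b hb2
      simp only [ffBloop]
      rw [if_neg hleaf]
      set m := (a + b).tdiv 2 with hm
      by_cases hleft : (PySem.List.slice fence (some a) (some m)).contains true = true
      · -- left half faulty: both descend left
        have hne := ffA_ne_neg_one fence fuel a m hm1 hleft (by omega)
        rw [if_pos hleft, if_pos (by simpa using hne),
            ih a m (k + 1) hm1 hleft (by omega)]
        simp only [Prod.mk.injEq]
        exact ⟨trivial, by omega⟩
      · -- left half clean: A pays 1 check for the failed left probe, B adds 2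
        have hleft' : (PySem.List.slice fence (some a) (some m)).contains true = false := by
          cases hx : (PySem.List.slice fence (some a) (some m)).contains true
          · rfl
          · exact absurd hx hleft
        have hfc : ffA fence fuel a m = (-1, 1) := by
          cases fuel with
          | zero => omega
          | succ fuel2 => exact ffA_no_fault fence fuel2 a m hleft'
        have hright := right_faulty fence a m b htrue hleft'
        rw [if_neg hleft, if_neg (by simp [hfc]),
            ih m b (k + 2) hm2 hright (by omega), hfc]
        simp only [Prod.mk.injEq]
        exact ⟨trivial, by omega⟩

-- ===== VERDICT (by name: the statement is the Claim_ definition above) =====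
theorem find_first_fault_in_spec : Claim_equal_find_first_fault_in := by
  intro fence start end_ _ hpre
  unfold Spec_find_first_fault_in find_first_fault_in find_first_fault_in_alt
  by_cases htrue : (PySem.List.slice fence (some start) (some end_)).contains true = true
  · rw [if_neg (by rw [htrue]; simp)]
    have hlt : start < end_ := by
      rcases hpre with h | h
      · exact h
      · rw [htrue] at h; cases h
    rw [loop_eq_ffA fence _ start end_ 1 hlt htrue (by omega)]
    simp
  · have hfalse : (PySem.List.slice fence (some start) (some end_)).contains true = false := by
      cases hx : (PySem.List.slice fence (some start) (some end_)).contains true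
      · rfl
      · exact absurd hx htrue
    rw [if_pos (by rw [hfalse]; exact Bool.false_ne_true),
        ffA_no_fault fence _ start end_ hfalse]
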